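-- pv_equiv track=rewrite | github.com/brkdnmz/inzvaland | Do The Math/#9/dealing-with-griffiths-remnants-ii/sol.py | solve
-- ===== SOURCE A (Python) =====
-- from math import gcd
--
-- def solve(n: str):
--     exp = 2
--     seen_dot = False
--     n_int = 0
--     for c in n:
--         if c == ".":
--             seen_dot = True
--             continue
--         exp += seen_dot
--         digit = ord(c) - ord("0")
--         n_int = 10 * n_int + digit
--     return n_int // gcd(n_int, 10**exp)
-- ===== SOURCE B (Python) =====
-- def _strip(m, p, e):
--     # divide out up to e factors of the prime p, stopping when none remain
--     if e == 0 or m % p != 0: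
--         return m
--     return _strip(m // p, p, e - 1)
--
--
-- def solve(n: str):
--     # single reversed pass: accumulate the digit value least-significant-first,
--     # and record the exponent whenever a dot is seen (the last dot seen in the
--     # reversed order is the first dot of n, which is the one that counts)
--     exp = 2
--     cnt = 0   # non-dot characters seen so far (from the right)
--     m = 0
--     pw = 1
--     for c in reversed(n):
--         if c == ".":
--             exp = 2 + cnt
--         else:
--             cnt += 1
--             m += (ord(c) - 48) * pw
--             pw *= 10
--     # reduce by the denominator 10**exp: strip its prime factors 2 and 5
--     return _strip(_strip(m, 2, exp), 5, exp)
-- ===== Notes on version B (the rewrite author's own statement) =====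
-- stated objective: alternative
-- what changed: B replaces A's left-to-right Horner parse plus gcd division by a single reversed pass (accumulating the value least-significant-digit-first with an explicit power of ten and capturing the exponent at the last dot seen, i.e. the first dot of n) followed by stripping the denominator's prime factors 2 and 5 instead of computing a gcd.
import Mathlib
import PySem

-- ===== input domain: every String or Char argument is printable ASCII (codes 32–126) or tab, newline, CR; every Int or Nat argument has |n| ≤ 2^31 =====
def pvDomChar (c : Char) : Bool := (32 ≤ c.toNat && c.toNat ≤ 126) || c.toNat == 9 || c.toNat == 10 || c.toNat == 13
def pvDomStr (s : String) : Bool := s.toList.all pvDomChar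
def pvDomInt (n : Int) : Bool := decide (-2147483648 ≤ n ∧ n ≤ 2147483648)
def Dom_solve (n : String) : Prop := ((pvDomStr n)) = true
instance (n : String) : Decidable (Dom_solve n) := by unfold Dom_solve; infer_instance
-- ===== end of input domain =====

-- B re-parses in one reversed pass (least-significant digit first, tracking the
-- power of ten and the exponent at the first dot) and reduces by stripping the
-- denominator's prime factors 2 and 5 instead of a gcd (alternative, same cost).

-- ===== PORT A =====
-- state: (exp, seen_dot, n_int); exp starts at 2 and only grows, so 10 ** exp = 10 ^ exp.toNat exactly
def solve (n : String) : Int :=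
  let st := n.toList.foldl
    (fun (s : Int × Bool × Int) c =>
      if c = '.' then (s.1, true, s.2.2)
      else (s.1 + (if s.2.1 then 1 else 0), s.2.1, 10 * s.2.2 + ((c.toNat : Int) - 48)))
    (2, false, 0)
  PySem.Int.floordiv st.2.2 ((Int.gcd st.2.2 (10 ^ st.1.toNat) : Nat) : Int)

-- ===== PORT B =====
-- `_strip(m, p, e)`: e ≥ 0 always (exp ≥ 2), so the recursion is on e as a Nat
def stripFac (p : Int) : Nat → Int → Int
  | 0, m => m
  | e + 1, m =>
    if PySem.Int.mod m p ≠ 0 then m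
    else stripFac p e (PySem.Int.floordiv m p)

-- state: (exp, cnt, m, pw), loop over reversed(n)
def solve_alt (n : String) : Int :=
  let st := n.toList.reverse.foldl
    (fun (s : Int × Int × Int × Int) c =>
      if c = '.' then (2 + s.2.1, s.2.1, s.2.2.1, s.2.2.2)
      else (s.1, s.2.1 + 1, s.2.2.1 + ((c.toNat : Int) - 48) * s.2.2.2, s.2.2.2 * 10))
    (2, 0, 0, 1)
  stripFac 5 st.1.toNat (stripFac 2 st.1.toNat st.2.2.1)

-- ===== PRECONDITION & SPEC =====
def Spec_solve (n : String) (out : Int) : Prop := out = solve_alt n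
instance (n : String) (out : Int) : Decidable (Spec_solve n out) := by unfold Spec_solve; infer_instance

-- ===== CLAIM (what is proved, stated in full; the proofs are below) =====
def Claim_equal_solve : Prop := ∀ (n : String), Dom_solve n → Spec_solve n (solve n)

-- ===== LEMMAS AND PROOFS =====

-- digit value of a character
def chVal (c : Char) : Int := (c.toNat : Int) - 48
-- the non-dot characters' values, in order
def vals (l : List Char) : List Int := (l.filter (· ≠ '.')).map chVal
-- number of non-dot characters
def nd (l : List Char) : Nat := (l.filter (· ≠ '.')).length
-- number of non-dot characters strictly after the FIRST dot
def gexp : List Char → Nat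
  | [] => 0
  | c :: t => if c = '.' then nd t else gexp t
-- number of non-dot characters strictly before the LAST dot (0 if no dot)
def bdot : List Char → Nat
  | [] => 0
  | c :: t => if '.' ∈ t then (if c = '.' then 0 else 1) + bdot t else 0
-- most-significant-first accumulation (A's loop)
def horner (m : Int) (ds : List Int) : Int := ds.foldl (fun a d => 10 * a + d) m
-- least-significant-first accumulation (B's loop)
def lsb : List Int → Int
  | [] => 0
  | d :: t => d + 10 * lsb t

theorem gexp_of_not_mem : ∀ l : List Char, '.' ∉ l → gexp l = 0 := by
  intro l h
  induction l with
  | nil => rfl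
  | cons c t ih =>
    have hc : ¬ c = '.' := fun hc => h (by simp [hc])
    simp only [gexp, if_neg hc]
    exact ih (fun ht => h (List.mem_cons_of_mem _ ht))

theorem bdot_append : ∀ (r : List Char) (c : Char),
    bdot (r ++ [c]) = if c = '.' then nd r else bdot r := by
  intro r c
  induction r with
  | nil => by_cases hc : c = '.' <;> simp [bdot, nd, hc]
  | cons a t ih =>
    by_cases hc : c = '.'
    · subst hc
      rw [if_pos rfl] at ih ⊢
      have hm : '.' ∈ t ++ ['.'] := by simp
      simp only [List.cons_append, bdot, if_pos hm, ih]
      by_cases ha : a = '.' <;> simp [nd, ha] <;> omega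
    · rw [if_neg hc] at ih ⊢
      have hm : ('.' ∈ t ++ [c]) ↔ '.' ∈ t := by
        rw [List.mem_append]
        simp only [List.mem_singleton]
        constructor
        · rintro (h | h)
          · exact h
          · exact absurd h.symm hc
        · exact Or.inl
      by_cases ht : '.' ∈ t
      · simp only [List.cons_append, bdot, if_pos (hm.mpr ht), if_pos ht, ih]
      · simp only [List.cons_append, bdot, if_neg (fun h => ht (hm.mp h)), if_neg ht]

theorem bdot_reverse_eq_gexp : ∀ l : List Char, '.' ∈ l → bdot l.reverse = gexp l := by
  intro l
  induction l with
  | nil => intro h; cases h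
  | cons c t ih =>
    intro h
    rw [List.reverse_cons, bdot_append]
    by_cases hc : c = '.'
    · simp only [gexp, if_pos hc, nd]
      simp [List.filter_reverse]
    · have ht : '.' ∈ t := by
        rcases List.mem_cons.mp h with h1 | h1
        · exact absurd h1.symm hc
        · exact h1
      simp only [gexp, if_neg hc]
      exact ih ht

theorem lsb_append (t : List Int) (d : Int) :
    lsb (t ++ [d]) = lsb t + d * 10 ^ t.length := by
  induction t with
  | nil => simp [lsb]
  | cons a s ih => simp [lsb, ih]; ring

theorem horner_eq_lsb : ∀ (ds : List Int) (m : Int),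
    horner m ds = m * 10 ^ ds.length + lsb ds.reverse := by
  intro ds
  induction ds with
  | nil => intro m; simp [horner, lsb]
  | cons d t ih =>
    intro m
    simp only [horner, List.foldl_cons] at *
    rw [ih (10 * m + d), List.reverse_cons, lsb_append]
    simp [List.length_reverse, pow_succ]
    ring

-- characterisation of A's fold (seen_dot = true)
theorem foldA_true : ∀ (l : List Char) (e m : Int),
    l.foldl (fun (s : Int × Bool × Int) c =>
      if c = '.' then (s.1, true, s.2.2)
      else (s.1 + (if s.2.1 then 1 else 0), s.2.1, 10 * s.2.2 + ((c.toNat : Int) - 48)))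
      (e, true, m)
    = (e + (nd l : Int), true, horner m (vals l)) := by
  intro l
  induction l with
  | nil => intro e m; simp [nd, vals, horner]
  | cons c t ih =>
    intro e m
    by_cases hc : c = '.'
    · simp only [List.foldl_cons, if_pos hc, ih]
      simp [nd, vals, hc]
    · simp only [List.foldl_cons, if_neg hc, ih]
      have : (nd (c :: t) : Int) = 1 + nd t := by
        simp [nd, hc]; ring
      simp [this, vals, hc, horner, chVal]
      ring_nf

-- characterisation of A's fold (seen_dot = false)
theorem foldA_false : ∀ (l : List Char) (e m : Int),
    l.foldl (fun (s : Int × Bool × Int) c =>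
      if c = '.' then (s.1, true, s.2.2)
      else (s.1 + (if s.2.1 then 1 else 0), s.2.1, 10 * s.2.2 + ((c.toNat : Int) - 48)))
      (e, false, m)
    = (e + (gexp l : Int), decide ('.' ∈ l), horner m (vals l)) := by
  intro l
  induction l with
  | nil => intro e m; simp [gexp, vals, horner]
  | cons c t ih =>
    intro e m
    by_cases hc : c = '.'
    · simp only [List.foldl_cons, if_pos hc, foldA_true]
      simp [gexp, hc, vals]
    · have hmem : ('.' ∈ c :: t) ↔ '.' ∈ t := by
        rw [List.mem_cons]
        constructor
        · rintro (h | h)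
          · exact absurd h.symm hc
          · exact h
        · exact Or.inr
      simp only [List.foldl_cons, if_neg hc, ih]
      simp [gexp, hc, vals, horner, chVal, hmem]

-- characterisation of B's fold over the reversed list
theorem foldB : ∀ (r : List Char) (e cnt m pw : Int),
    r.foldl (fun (s : Int × Int × Int × Int) c =>
      if c = '.' then (2 + s.2.1, s.2.1, s.2.2.1, s.2.2.2)
      else (s.1, s.2.1 + 1, s.2.2.1 + ((c.toNat : Int) - 48) * s.2.2.2, s.2.2.2 * 10))
      (e, cnt, m, pw)
    = ((if '.' ∈ r then 2 + cnt + (bdot r : Int) else e),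
       cnt + (nd r : Int), m + pw * lsb (vals r), pw * 10 ^ nd r) := by
  intro r
  induction r with
  | nil => intro e cnt m pw; simp [nd, vals, lsb]
  | cons c t ih =>
    intro e cnt m pw
    by_cases hc : c = '.'
    · simp only [List.foldl_cons, if_pos hc, ih]
      subst hc
      by_cases ht : '.' ∈ t
      · simp [bdot, ht, nd, vals]
      · simp [bdot, ht, nd, vals]
    · simp only [List.foldl_cons, if_neg hc, ih]
      have hmem : ('.' ∈ c :: t) ↔ '.' ∈ t := by
        rw [List.mem_cons]
        constructor
        · rintro (h | h)
          · exact absurd h.symm hc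
          · exact h
        · exact Or.inr
      have hnd : (nd (c :: t) : Int) = 1 + nd t := by
        simp [nd, hc]; ring
      have hbd : '.' ∈ t → (bdot (c :: t) : Int) = 1 + bdot t := by
        intro ht; simp [bdot, ht, hc]
      have hvals : vals (c :: t) = chVal c :: vals t := by
        simp [vals, hc]
      have hndn : nd (c :: t) = 1 + nd t := by
        simp [nd, hc]; ring_nf
      simp only [Prod.mk.injEq]
      refine ⟨?_, ?_, ?_, ?_⟩
      · by_cases ht : '.' ∈ t
        · rw [if_pos ht, if_pos (hmem.mpr ht), hbd ht]; ring
        · rw [if_neg ht, if_neg (fun h => ht (hmem.mp h))]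
      · rw [hnd]; ring
      · rw [hvals]; simp only [lsb]; simp [chVal]; ring
      · rw [hndn, pow_add]; ring

theorem gcd_pow_of_not_dvd {q : Nat} (hq : q.Prime) {a : Int} (h : ¬ ((q : Int) ∣ a))
    (k : Nat) : Int.gcd a ((q : Int) ^ k) = 1 := by
  have hna : ¬ q ∣ a.natAbs := by
    intro hd
    have hd' : ((q : Int)).natAbs ∣ a.natAbs := by simpa using hd
    exact h (Int.natAbs_dvd_natAbs.mp hd')
  have hc : Nat.Coprime a.natAbs q := ((hq.coprime_iff_not_dvd).mpr hna).symm
  have := hc.pow_right k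
  simpa [Int.gcd, Int.natAbs_pow] using this

theorem strip_eq_div {q : Nat} (hq : q.Prime) :
    ∀ (e : Nat) (a : Int), stripFac (q : Int) e a = a / ((Int.gcd a ((q : Int) ^ e) : Nat) : Int) := by
  intro e
  induction e with
  | zero =>
    intro a
    simp [stripFac, Int.gcd]
  | succ k ih =>
    intro a
    have hq0 : (0 : Int) < (q : Int) := by exact_mod_cast hq.pos
    by_cases hdvd : (q : Int) ∣ a
    · obtain ⟨b, rfl⟩ := hdvd
      have hmod : PySem.Int.mod ((q : Int) * b) (q : Int) = 0 :=
        (PySem.Int.mod_eq_zero_iff_dvd _ _).mpr ⟨b, rfl⟩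
      have hfd : PySem.Int.floordiv ((q : Int) * b) (q : Int) = b := by
        rw [PySem.Int.floordiv_eq_ediv_of_pos hq0]
        exact Int.mul_ediv_cancel_left b hq0.ne'
      have hg : Int.gcd ((q : Int) * b) ((q : Int) ^ (k + 1)) = q * Int.gcd b ((q : Int) ^ k) := by
        rw [pow_succ, mul_comm ((q : Int) ^ k) (q : Int), Int.gcd_mul_left]
        simp
      rw [stripFac, if_neg (by simp [hmod]), hfd, ih, hg]
      push_cast
      rw [Int.mul_ediv_mul_of_pos _ _ hq0]
    · have hmod : PySem.Int.mod a (q : Int) ≠ 0 := fun h0 =>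
        hdvd ((PySem.Int.mod_eq_zero_iff_dvd _ _).mp h0)
      rw [stripFac, if_pos hmod, gcd_pow_of_not_dvd hq hdvd (k + 1)]
      simp

theorem gcd_mul_coprime {A m n : Nat} (hcop : Nat.Coprime m n) :
    Nat.gcd A (m * n) = Nat.gcd A m * Nat.gcd A n := by
  apply Nat.dvd_antisymm
  · have hx : Nat.gcd A (m * n) ∣ n * m := (Nat.gcd_dvd_right _ _).trans (by rw [mul_comm])
    have h := (Nat.gcd_mul_gcd_eq_iff_dvd_mul_of_coprime hcop.symm).mpr hx
    calc Nat.gcd A (m * n) = Nat.gcd (Nat.gcd A (m * n)) n * Nat.gcd (Nat.gcd A (m * n)) m :=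
          h.symm
      _ ∣ Nat.gcd A n * Nat.gcd A m :=
          Nat.mul_dvd_mul
            (Nat.dvd_gcd ((Nat.gcd_dvd_left _ _).trans (Nat.gcd_dvd_left _ _))
              (Nat.gcd_dvd_right _ _))
            (Nat.dvd_gcd ((Nat.gcd_dvd_left _ _).trans (Nat.gcd_dvd_left _ _))
              (Nat.gcd_dvd_right _ _))
      _ = Nat.gcd A m * Nat.gcd A n := mul_comm _ _
  · have hc : Nat.Coprime (Nat.gcd A m) (Nat.gcd A n) :=
      Nat.Coprime.coprime_dvd_left (Nat.gcd_dvd_right _ _)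
        (Nat.Coprime.coprime_dvd_right (Nat.gcd_dvd_right _ _) hcop)
    exact Nat.dvd_gcd
      (hc.mul_dvd_of_dvd_of_dvd (Nat.gcd_dvd_left _ _) (Nat.gcd_dvd_left _ _))
      (Nat.mul_dvd_mul (Nat.gcd_dvd_right _ _) (Nat.gcd_dvd_right _ _))

-- dividing out a factor coprime to M leaves gcd with M unchanged
theorem gcd_div_coprime {A d M : Nat} (hd : d ∣ A) (hcop : Nat.Coprime d M) :
    Nat.gcd (A / d) M = Nat.gcd A M := by
  apply Nat.dvd_antisymm
  · exact Nat.dvd_gcd ((Nat.gcd_dvd_left _ _).trans ⟨d, (Nat.div_mul_cancel hd).symm⟩)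
      (Nat.gcd_dvd_right _ _)
  · have hgM : Nat.gcd A M ∣ M := Nat.gcd_dvd_right _ _
    have hcg : Nat.Coprime (Nat.gcd A M) d :=
      (Nat.Coprime.coprime_dvd_right hgM hcop).symm
    have hA : A = d * (A / d) := (Nat.mul_div_cancel' hd).symm
    have h1 : Nat.gcd A M ∣ d * (A / d) := hA ▸ Nat.gcd_dvd_left _ _
    exact Nat.dvd_gcd (hcg.dvd_of_dvd_mul_left h1) hgM

theorem key (e : Nat) (a : Int) :
    PySem.Int.floordiv a ((Int.gcd a ((10 : Int) ^ e) : Nat) : Int)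
      = stripFac 5 e (stripFac 2 e a) := by
  set g2 : Nat := Int.gcd a ((2 : Int) ^ e) with hg2
  set g5 : Nat := Int.gcd a ((5 : Int) ^ e) with hg5
  have hg2pos : 0 < g2 := Int.gcd_pos_iff.mpr (Or.inr (by positivity))
  have hg5pos : 0 < g5 := Int.gcd_pos_iff.mpr (Or.inr (by positivity))
  have h2dvd : ((g2 : Nat) : Int) ∣ a := hg2 ▸ Int.gcd_dvd_left a ((2 : Int) ^ e)
  have hdN : g2 ∣ a.natAbs := by
    have := Int.natAbs_dvd_natAbs.mpr h2dvd
    simpa using this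
  obtain ⟨b, hb⟩ := h2dvd
  have hdivb : a / (g2 : Int) = b := by
    rw [hb]; exact Int.mul_ediv_cancel_left b (by exact_mod_cast hg2pos.ne')
  have hbabs : b.natAbs = a.natAbs / g2 := by
    have : a.natAbs = g2 * b.natAbs := by
      rw [hb, Int.natAbs_mul]; simp
    rw [this, Nat.mul_div_cancel_left _ hg2pos]
  have hstrip2 : stripFac 2 e a = a / (g2 : Int) := by
    have := strip_eq_div Nat.prime_two e a
    simpa [hg2] using this
  have hcop25 : Nat.Coprime (2 ^ e) (5 ^ e) := Nat.Coprime.pow e e ((Nat.coprime_primes Nat.prime_two Nat.prime_five).mpr (by decide))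
  have hg2cop : Nat.Coprime g2 (5 ^ e) := by
    have hdvd2 : g2 ∣ 2 ^ e := by
      have := Int.gcd_dvd_right (a := a) (b := (2 : Int) ^ e)
      have := Int.natAbs_dvd_natAbs.mpr this
      simpa [Int.natAbs_pow] using this
    exact Nat.Coprime.coprime_dvd_left hdvd2 hcop25
  have hgcd5' : Int.gcd (a / (g2 : Int)) ((5 : Int) ^ e) = g5 := by
    have hN : Nat.gcd (a.natAbs / g2) (5 ^ e) = Nat.gcd a.natAbs (5 ^ e) :=
      gcd_div_coprime hdN hg2cop
    have h1 : Int.gcd (a / (g2 : Int)) ((5 : Int) ^ e) = Nat.gcd (a.natAbs / g2) (5 ^ e) := by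
      rw [hdivb]
      simp [Int.gcd, Int.natAbs_pow, hbabs]
    have h2 : g5 = Nat.gcd a.natAbs (5 ^ e) := by
      simp [hg5, Int.gcd, Int.natAbs_pow]
    rw [h1, hN, ← h2]
  have hstrip5 : stripFac 5 e (a / (g2 : Int)) = (a / (g2 : Int)) / (g5 : Int) := by
    have := strip_eq_div Nat.prime_five e (a / (g2 : Int))
    simpa [hgcd5'] using this
  have hsplit : Int.gcd a ((10 : Int) ^ e) = g2 * g5 := by
    have h10 : ((10 : Int) ^ e).natAbs = 2 ^ e * 5 ^ e := by
      simp [Int.natAbs_pow, ← mul_pow]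
    have : Int.gcd a ((10 : Int) ^ e) = Nat.gcd a.natAbs (2 ^ e * 5 ^ e) := by
      simp [Int.gcd, h10]
    rw [this, gcd_mul_coprime hcop25]
    simp [hg2, hg5, Int.gcd, Int.natAbs_pow]
  have hg5dvd : ((g5 : Nat) : Int) ∣ a / (g2 : Int) := hgcd5' ▸ Int.gcd_dvd_left (a / (g2 : Int)) ((5 : Int) ^ e)
  obtain ⟨c, hc⟩ := hg5dvd
  have ha : a = ((g2 : Int) * (g5 : Int)) * c := by
    have : a = (g2 : Int) * (a / (g2 : Int)) := by
      rw [hdivb]; exact hb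
    rw [this, hc]; ring
  have hprodpos : (0 : Int) < (g2 : Int) * (g5 : Int) := by
    have : (0:Int) < (g2:Int) := by exact_mod_cast hg2pos
    have h5 : (0:Int) < (g5:Int) := by exact_mod_cast hg5pos
    positivity
  have hfd : PySem.Int.floordiv a ((Int.gcd a ((10 : Int) ^ e) : Nat) : Int)
      = a / ((Int.gcd a ((10 : Int) ^ e) : Nat) : Int) :=
    PySem.Int.floordiv_eq_ediv_of_pos (by
      rw [hsplit]; push_cast; exact hprodpos)
  rw [hfd, hstrip2, hstrip5, hsplit]
  rw [hc, ha]
  push_cast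
  rw [Int.mul_ediv_cancel_left _ hprodpos.ne']
  rw [Int.mul_ediv_cancel_left c (by exact_mod_cast hg5pos.ne')]

-- ===== VERDICT (by name: the statement is the Claim_ definition above) =====
theorem solve_spec : Claim_equal_solve := by
  intro n _
  unfold Spec_solve solve solve_alt
  rw [foldA_false, foldB]
  have hexp : (if '.' ∈ n.toList.reverse then 2 + 0 + (bdot n.toList.reverse : Int)
      else (2 : Int)) = 2 + (gexp n.toList : Int) := by
    by_cases h : '.' ∈ n.toList
    · rw [if_pos (List.mem_reverse.mpr h), bdot_reverse_eq_gexp _ h]; ring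
    · rw [if_neg (fun hr => h (List.mem_reverse.mp hr)), gexp_of_not_mem _ h]; simp
  have hm : (0 : Int) + 1 * lsb (vals n.toList.reverse) = horner 0 (vals n.toList) := by
    have hv : vals n.toList.reverse = (vals n.toList).reverse := by
      simp [vals, List.filter_reverse, List.map_reverse]
    rw [hv, horner_eq_lsb]
    ring
  simp only [hexp, hm]
  exact key _ _
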